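-- pv_equiv track=rewrite | github.com/kadirbulut/CSE321-Introduction-to-Algorithm-Design | HW2/findRottenWalnut[121044005].py | findRottenWalnut
-- ===== SOURCE A (Python) =====
-- def compareScales (leftScaleList, rightScaleList):
--     result = sum(leftScaleList) - sum(rightScaleList)
--     if result < 0:
--         return 1
--     elif result > 0:
--         return -1
--     else:
--         return 0
--
-- def findRottenWalnut(inputList):
--     flag=0
--     #seperate the list into two part (left and right and compare their weights)
--     a= compareScales(inputList[:int(len(inputList)/2)],inputList[int(len(inputList)/2):])
--     #if left and right have equal weights . (namely,list's length is even number)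
--     if a==0:
--         return -1
--     #if the element is last element
--     if len(inputList) == 1:
--         return 0
--     #check that if list's length is an odd number.
--     if len(inputList) % 2 == 1:
--         if inputList[0] < inputList[1]: # if list's first element is lighter element
--             return 0
--         else:
--             del inputList[0] #delete the first element if it is not lighter element
--             if compareScales(inputList[:int(len(inputList)/2)],inputList[int(len(inputList)/2):]) == 0:
--                 return -1
--             else:
--                 flag=1
-- 				#scale left and right again
--                 a= compareScales(inputList[:int(len(inputList)/2)],inputList[int(len(inputList)/2):])
--     #if left part is more lighter than right part,turn left
--     if a==1:
--         if flag == 1: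
--             return findRottenWalnut(inputList[:int(len(inputList)/2)]) + 1
--         else:
--             return findRottenWalnut(inputList[:int(len(inputList)/2)])
--     #if right part is more lighter than left part,turn rihgt and increase (half of list's lenght )the searched element's index
--     if a==-1:
--         if flag == 1:
--             return findRottenWalnut(inputList[int(len(inputList)/2):]) + int(len(inputList)/2) + 1
--         else:
--             return findRottenWalnut(inputList[int(len(inputList)/2):]) + int(len(inputList)/2)
-- ===== SOURCE B (Python) =====
-- def findRottenWalnut(inputList):
--     # iterative halving search: keep current window + accumulated index offset
--     # (mutates the caller's list exactly like the original: only the very first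
--     # window is the caller's list, later windows are fresh slices)
--     cur = inputList
--     off = 0
--     while True:
--         h = len(cur) // 2
--         d = sum(cur[:h]) - sum(cur[h:])
--         if d == 0:
--             return off - 1
--         if len(cur) == 1:
--             return off
--         if len(cur) % 2 == 1:
--             if cur[0] < cur[1]:
--                 return off
--             del cur[0]
--             h = len(cur) // 2
--             d = sum(cur[:h]) - sum(cur[h:])
--             if d == 0:
--                 return off - 1
--             off += 1
--         if d < 0:
--             cur = cur[:h]
--         else:
--             cur = cur[h:]
--             off += h
-- ===== Notes on version B (the rewrite author's own statement) =====
-- stated objective: alternative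
-- what changed: Replaces A's recursion (which post-corrects each recursive result by +half/+1) with a single iterative loop that keeps the current window and an accumulated index offset, and branches on the sign of the weight difference directly instead of through the compareScales helper.
import Mathlib
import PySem

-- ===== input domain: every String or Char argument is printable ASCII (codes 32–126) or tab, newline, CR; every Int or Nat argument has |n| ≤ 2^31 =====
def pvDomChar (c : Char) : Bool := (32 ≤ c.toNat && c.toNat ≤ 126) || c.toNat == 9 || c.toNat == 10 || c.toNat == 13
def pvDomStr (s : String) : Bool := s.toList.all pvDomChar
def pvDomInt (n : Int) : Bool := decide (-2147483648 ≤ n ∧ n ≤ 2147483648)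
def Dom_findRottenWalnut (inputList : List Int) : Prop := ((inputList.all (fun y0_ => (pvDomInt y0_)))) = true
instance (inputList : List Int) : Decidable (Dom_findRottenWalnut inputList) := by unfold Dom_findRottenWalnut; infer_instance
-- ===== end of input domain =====

-- B replaces A's recursion-with-result-correction by an iterative window+offset
-- accumulator loop (objective: alternative). Equivalence is about the RETURN
-- value; both Pythons delete the head of the caller's list in the same case.

-- ===== PORT A =====
-- compareScales: 1 if left side lighter, -1 if right side lighter, 0 if balanced
def compareScales (leftScaleList rightScaleList : List Int) : Int :=
  let result := leftScaleList.sum - rightScaleList.sum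
  if result < 0 then 1 else if result > 0 then -1 else 0

-- slices xs[:k] / xs[k:] with 0 ≤ k ≤ len are exactly take/drop; int(len/2) = len / 2 on Nat
def findRottenWalnut (inputList : List Int) : Int :=
  let h := inputList.length / 2
  if _h0 : compareScales (inputList.take h) (inputList.drop h) = 0 then -1
  else if _h1 : inputList.length = 1 then 0
  else if inputList.length % 2 = 1 then
    match inputList with
    | x :: y :: rest =>
      if x < y then 0
      else
        -- del inputList[0]: continue on the tail
        let ys := y :: rest
        let h2 := ys.length / 2
        if compareScales (ys.take h2) (ys.drop h2) = 0 then -1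
        else
          -- flag = 1; re-weigh
          if compareScales (ys.take h2) (ys.drop h2) = 1 then
            findRottenWalnut (ys.take h2) + 1
          else -- a = -1 (only remaining value)
            findRottenWalnut (ys.drop h2) + (h2 : Int) + 1
    | _ => 0 -- unreachable: length is odd and ≠ 1, hence ≥ 3
  else
    if compareScales (inputList.take h) (inputList.drop h) = 1 then
      findRottenWalnut (inputList.take h)
    else -- a = -1 (only remaining value)
      findRottenWalnut (inputList.drop h) + (h : Int)
termination_by inputList.length
decreasing_by
  · simp [List.length_take] <;> omega
  · simp [List.length_drop] <;> omega
  · rcases inputList with _ | ⟨a1, _ | ⟨a2, t⟩⟩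
    · simp [compareScales] at _h0
    · simp at _h1
    · simp [List.length_take] <;> omega
  · rcases inputList with _ | ⟨a1, _ | ⟨a2, t⟩⟩
    · simp [compareScales] at _h0
    · simp at _h1
    · simp [List.length_drop] <;> omega

-- ===== PORT B =====
-- the while-loop of Source B: current window `cur`, accumulated index offset `off`
def pvLoopB (cur : List Int) (off : Int) : Int :=
  let h := cur.length / 2
  if _g0 : (cur.take h).sum - (cur.drop h).sum = 0 then off - 1
  else if _g1 : cur.length = 1 then off
  else if cur.length % 2 = 1 then
    -- here cur.length is odd and ≥ 3, so cur[0] and cur[1] exist: head!/tail are exact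
    if cur.head! < cur.tail.head! then off
    else
      let ys := cur.tail   -- del cur[0]
      let h2 := ys.length / 2
      if (ys.take h2).sum - (ys.drop h2).sum = 0 then off - 1
      else if (ys.take h2).sum - (ys.drop h2).sum < 0 then
        pvLoopB (ys.take h2) (off + 1)
      else
        pvLoopB (ys.drop h2) (off + 1 + (h2 : Int))
  else
    if (cur.take h).sum - (cur.drop h).sum < 0 then pvLoopB (cur.take h) off
    else pvLoopB (cur.drop h) (off + (h : Int))
termination_by cur.length
decreasing_by
  · rcases cur with _ | ⟨a1, t⟩
    · simp at _g0
    · simp [List.length_take] <;> omega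
  · rcases cur with _ | ⟨a1, t⟩
    · simp at _g0
    · simp [List.length_drop] <;> omega
  · rcases cur with _ | ⟨a1, _ | ⟨a2, t⟩⟩
    · simp at _g0
    · simp at _g1
    · simp [List.length_take] <;> omega
  · rcases cur with _ | ⟨a1, _ | ⟨a2, t⟩⟩
    · simp at _g0
    · simp at _g1
    · simp [List.length_drop] <;> omega

def findRottenWalnut_alt (inputList : List Int) : Int := pvLoopB inputList 0

-- ===== PRECONDITION & SPEC =====
def Spec_findRottenWalnut (inputList : List Int) (out : Int) : Prop := out = findRottenWalnut_alt inputList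
instance (inputList : List Int) (out : Int) : Decidable (Spec_findRottenWalnut inputList out) := by unfold Spec_findRottenWalnut; infer_instance

-- ===== CLAIM (what is proved, stated in full; the proofs are below) =====
def Claim_equal_findRottenWalnut : Prop := ∀ (inputList : List Int), Dom_findRottenWalnut inputList → Spec_findRottenWalnut inputList (findRottenWalnut inputList)

-- ===== LEMMAS AND PROOFS =====

lemma compareScales_eq_zero (l r : List Int) : (compareScales l r = 0) ↔ (l.sum - r.sum = 0) := by
  simp only [compareScales]; split_ifs <;> simp <;> omega

lemma compareScales_eq_one (l r : List Int) : (compareScales l r = 1) ↔ (l.sum - r.sum < 0) := by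
  simp only [compareScales]; split_ifs <;> simp <;> omega

-- loop invariant: the iterative loop equals A's recursion plus the carried offset
lemma pvLoopB_eq (n : Nat) : ∀ (xs : List Int) (off : Int), xs.length ≤ n →
    pvLoopB xs off = findRottenWalnut xs + off := by
  induction n with
  | zero =>
    intro xs off hlen
    have : xs = [] := by cases xs <;> simp_all
    subst this
    rw [pvLoopB, findRottenWalnut]
    norm_num [compareScales]
    omega
  | succ n ih =>
    intro xs off hlen
    rw [pvLoopB, findRottenWalnut]
    simp only [compareScales_eq_zero, compareScales_eq_one]
    rcases xs with _ | ⟨x, _ | ⟨y, rest⟩⟩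
    · norm_num
      omega
    · clear ih hlen
      simp
      split_ifs <;> omega
    · have hb : rest.length + 1 ≤ n := by simpa using hlen
      have ih1 := ih ((y::rest).take ((y::rest).length/2)) (off+1)
        (by simp [List.length_take]; omega)
      have ih2 := ih ((y::rest).drop ((y::rest).length/2))
        (off+1+(((y::rest).length/2 : Nat) : Int)) (by simp; omega)
      have ih3 := ih ((x::y::rest).take ((x::y::rest).length/2)) off
        (by simp [List.length_take]; omega)
      have ih4 := ih ((x::y::rest).drop ((x::y::rest).length/2))
        (off+(((x::y::rest).length/2 : Nat) : Int)) (by simp; omega)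
      simp only [List.head!_cons, List.tail_cons]
      split_ifs <;>
        first
          | omega
          | ring1
          | (simp only [ih1, ih2, ih3, ih4]; first | omega | ring1)

-- ===== VERDICT (by name: the statement is the Claim_ definition above) =====
theorem findRottenWalnut_spec : Claim_equal_findRottenWalnut := by
  intro xs _
  unfold Spec_findRottenWalnut findRottenWalnut_alt
  rw [pvLoopB_eq xs.length xs 0 le_rfl]
  ring
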